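-- pv_equiv track=rewrite | github.com/RustingSword/adventofcode2019 | 16/sol1.py | fft
-- ===== SOURCE A (Python) =====
-- from itertools import cycle
--
-- base = [0, 1, 0, -1]
--
-- def generate_pattern(phase):
--     pattern = []
--     for i in range(len(base)):
--         pattern.extend([base[i]] * phase)
--     shifted = pattern[1:] + [pattern[0]]
--     return shifted
--
-- def fft(signal):
--     size = len(signal)
--     output = []
--     for i in range(1, size+1):
--         pattern = generate_pattern(i)
--         res = 0
--         for x, y in (
--             zip(signal, pattern)
--             if len(signal) <= len(pattern)
--             else zip(signal, cycle(pattern))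
--         ):
--             res += x * y
--         output.append(int(str(res)[-1]))
--     return output
-- ===== SOURCE B (Python) =====
-- def fft(sig):
--     n = len(sig)
--     prefix = [0]
--     for x in sig:
--         prefix.append(prefix[-1] + x)
--     out = []
--     for i in range(1, n + 1):
--         total = 0
--         sign = 1
--         for j in range(i - 1, n, 2 * i):
--             total += sign * (prefix[min(j + i, n)] - prefix[j])
--             sign = -sign
--         out.append(int(str(total)[-1]))
--     return out
-- ===== Notes on version B (the rewrite author's own statement) =====
-- stated objective: faster
-- what changed: B replaces A's per-output repeating-pattern generation and full dot product (zip with a cycled pattern) by one cumulative-sum array, computing each output digit from O(n/i) prefix-sum range differences with alternating sign.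
import Mathlib
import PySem

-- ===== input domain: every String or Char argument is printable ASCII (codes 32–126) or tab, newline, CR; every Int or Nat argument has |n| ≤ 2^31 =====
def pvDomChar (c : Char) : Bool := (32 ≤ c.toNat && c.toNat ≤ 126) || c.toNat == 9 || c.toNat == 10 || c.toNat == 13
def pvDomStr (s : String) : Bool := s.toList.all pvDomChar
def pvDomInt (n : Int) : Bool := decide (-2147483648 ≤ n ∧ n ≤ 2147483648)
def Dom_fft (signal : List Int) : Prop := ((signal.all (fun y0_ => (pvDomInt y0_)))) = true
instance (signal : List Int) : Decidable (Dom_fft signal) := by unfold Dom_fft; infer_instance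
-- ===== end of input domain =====

-- B replaces A's per-output repeating-pattern dot product by one cumulative-sum array and
-- signed range sums per output (objective: faster; measured faster in a timing run).

-- ===== PORT A =====
-- int(str(res)[-1]) — both Pythons end each output with this digit extraction
def pyLastDigit (res : Int) : Int :=
  (PySem.Int.ofChars? [(PySem.Str.pyGet? (PySem.Int.toStr res) (-1)).getD '0']).getD 0

def fftBase : List Int := [0, 1, 0, -1]

def generate_pattern (phase : Int) : List Int :=
  let pattern : List Int :=
    (PySem.List.pyRange 0 4 1).foldl
      (fun pat i => pat ++ List.replicate phase.toNat (PySem.List.pyGetD fftBase i 0)) []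
  -- pattern[1:] + [pattern[0]]; fft only calls phase ≥ 1, where pattern[0] is in range
  PySem.List.slice pattern (some 1) none ++ [PySem.List.pyGetD pattern 0 0]

def fft (signal : List Int) : List Int :=
  let size : Int := (signal.length : Int)
  (PySem.List.pyRange 1 (size + 1) 1).foldl
    (fun output i =>
      let pattern := generate_pattern i
      let res : Int :=
        if signal.length ≤ pattern.length then
          (signal.zip pattern).foldl (fun r p => r + p.1 * p.2) 0
        else
          -- zip(signal, cycle(pattern)): position k pairs with pattern[k % len(pattern)];
          -- exact here since this branch has 0 < len(pattern) < len(signal)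
          (PySem.List.enumerate signal).foldl
            (fun r p =>
              r + p.2 * PySem.List.pyGetD pattern (PySem.Int.mod p.1 (pattern.length : Int)) 0) 0
      output ++ [pyLastDigit res]) []

-- ===== PORT B =====
def fft_alt (signal : List Int) : List Int :=
  let n : Int := (signal.length : Int)
  let pfx : List Int :=
    signal.foldl (fun pre x => pre ++ [PySem.List.pyGetD pre (-1) 0 + x]) [0]
  (PySem.List.pyRange 1 (n + 1) 1).foldl
    (fun out i =>
      let total : Int :=
        ((PySem.List.pyRange (i - 1) n (2 * i)).foldl
          (fun (ts : Int × Int) j =>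
            (ts.1 + ts.2 * (PySem.List.pyGetD pfx (min (j + i) n) 0
                            - PySem.List.pyGetD pfx j 0), -ts.2))
          (0, 1)).1
      out ++ [pyLastDigit total]) []

-- ===== PRECONDITION & SPEC =====
def Spec_fft (signal : List Int) (out : List Int) : Prop := out = fft_alt signal
instance (signal : List Int) (out : List Int) : Decidable (Spec_fft signal out) := by unfold Spec_fft; infer_instance

-- ===== CLAIM (what is proved, stated in full; the proofs are below) =====
def Claim_equal_fft : Prop := ∀ (signal : List Int), Dom_fft signal → Spec_fft signal (fft signal)

-- ===== LEMMAS AND PROOFS =====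

-- the base-pattern coefficient multiplying signal[k] in output i = m (1-based)
def fcoef (m k : Nat) : Int :=
  if (k + 1) / m % 4 = 1 then 1 else if (k + 1) / m % 4 = 3 then -1 else 0

-- closed form of generate_pattern m for m ≥ 1
def patP (m : Nat) : List Int :=
  List.replicate (m - 1) 0 ++ List.replicate m 1 ++ List.replicate m 0
    ++ List.replicate m (-1) ++ [0]

-- running sums of a list starting from s
def sumsFrom (s : Int) : List Int → List Int
  | [] => []
  | x :: xs => (s + x) :: sumsFrom (s + x) xs

-- the common value both ports compute before digit extraction
def dotc (sig : List Int) (m : Nat) : Int :=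
  ∑ k ∈ Finset.range sig.length, sig.getD k 0 * fcoef m k

theorem pyRange_pos_cons (a b s : Int) (hs : 0 < s) (hab : a < b) :
    PySem.List.pyRange a b s = a :: PySem.List.pyRange (a + s) b s := by
  rw [PySem.List.pyRange_of_pos a b hs, PySem.List.pyRange_of_pos (a+s) b hs]
  by_cases h2 : a + s < b
  · simp only [if_pos hab, if_pos h2]
    have key : ((b - a + s - 1) / s).toNat = ((b - (a+s) + s - 1) / s).toNat + 1 := by
      have : b - a + s - 1 = (b - (a+s) + s - 1) + 1 * s := by ring
      rw [this, Int.add_mul_ediv_right _ _ (by omega)]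
      have h0 : 0 ≤ (b - (a+s) + s - 1) / s := by
        apply Int.ediv_nonneg <;> omega
      omega
    rw [key, List.range_succ_eq_map]
    simp only [List.map_cons, List.map_map]
    congr 1
    · push_cast; ring
    · apply List.map_congr_left
      intro k _
      simp only [Function.comp_apply]
      push_cast
      ring
  · simp only [if_pos hab, if_neg h2]
    have h1 : (b - a + s - 1) / s = 1 := by
      have hlo : 1 ≤ (b - a + s - 1) / s := by
        rw [Int.le_ediv_iff_mul_le hs]; omega
      have hhi : (b - a + s - 1) / s < 2 :=
        Int.ediv_lt_of_lt_mul hs (by omega)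
      omega
    rw [h1]
    simp

theorem take_sum (sig : List Int) : ∀ (e : Nat), e ≤ sig.length →
    (sig.take e).sum = ∑ k ∈ Finset.range e, sig.getD k 0 := by
  induction sig with
  | nil => intro e he; simp_all
  | cons x xs ih =>
    intro e he
    cases e with
    | zero => simp
    | succ e' =>
      simp only [List.take_succ_cons, List.sum_cons, Finset.sum_range_succ']
      rw [ih e' (by simpa using he)]
      simp [add_comm]

theorem prefix_foldl (sig : List Int) : ∀ (pre : List Int) (x0 : Int),
    sig.foldl (fun pre x => pre ++ [PySem.List.pyGetD pre (-1) 0 + x]) (pre ++ [x0])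
      = (pre ++ [x0]) ++ sumsFrom x0 sig := by
  induction sig with
  | nil => intro pre x0; simp [sumsFrom]
  | cons x xs ih =>
    intro pre x0
    simp only [List.foldl_cons, PySem.List.pyGetD_neg_one_append_singleton, sumsFrom]
    have := ih (pre ++ [x0]) (x0 + x)
    simp only [List.append_assoc] at this ⊢
    simpa using this

theorem sumsFrom_getD (sig : List Int) : ∀ (s : Int) (j : Nat), j < sig.length →
    (sumsFrom s sig).getD j 0 = s + (sig.take (j + 1)).sum := by
  induction sig with
  | nil => intro s j h; simp at h
  | cons x xs ih =>
    intro s j hj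
    cases j with
    | zero => simp [sumsFrom]
    | succ j' =>
      simp only [sumsFrom, List.getD_cons_succ, List.take_succ_cons, List.sum_cons]
      rw [ih (s + x) j' (by simpa using hj)]
      ring

theorem prefix_getD (sig : List Int) (j : Nat) (hj : j ≤ sig.length) :
    (([0] ++ sumsFrom 0 sig) : List Int).getD j 0 = ∑ k ∈ Finset.range j, sig.getD k 0 := by
  cases j with
  | zero => simp
  | succ j' =>
    have hj' : j' < sig.length := by omega
    simp only [List.singleton_append, List.getD_cons_succ]
    rw [sumsFrom_getD sig 0 j' hj', take_sum sig (j'+1) (by omega)]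
    ring

theorem zip_sum (sig : List Int) : ∀ (P : List Int), sig.length ≤ P.length →
    ((sig.zip P).map (fun p => p.1 * p.2)).sum
      = ∑ k ∈ Finset.range sig.length, sig.getD k 0 * P.getD k 0 := by
  induction sig with
  | nil => intro P h; simp
  | cons x xs ih =>
    intro P h
    cases P with
    | nil => simp at h
    | cons y ys =>
      simp only [List.zip_cons_cons, List.map_cons, List.sum_cons, List.length_cons,
        Finset.sum_range_succ']
      rw [ih ys (by simpa using h)]
      simp [add_comm]

theorem zipIdx_sum (sig : List Int) (c : Nat → Int) : ∀ (s : Nat),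
    ((sig.zipIdx s).map (fun p => p.1 * c p.2)).sum
      = ∑ k ∈ Finset.range sig.length, sig.getD k 0 * c (s + k) := by
  induction sig with
  | nil => intro s; simp
  | cons x xs ih =>
    intro s
    simp only [List.zipIdx_cons, List.map_cons, List.sum_cons, List.length_cons,
      Finset.sum_range_succ']
    rw [ih (s + 1)]
    simp only [List.getD_cons_succ, List.getD_cons_zero]
    have : ∀ k, s + 1 + k = s + (k + 1) := by omega
    simp [this, add_comm]

theorem fcoef_small (m k : Nat) (h : k + 1 < m) : fcoef m k = 0 := by
  unfold fcoef
  rw [Nat.div_eq_of_lt h]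
  simp

theorem genpat_eq (m : Nat) (hm : 1 ≤ m) : generate_pattern (m : Int) = patP m := by
  obtain ⟨m', rfl⟩ : ∃ m', m = m' + 1 := ⟨m - 1, by omega⟩
  have hrange : PySem.List.pyRange 0 4 1 = [0, 1, 2, 3] := by decide
  simp only [generate_pattern, hrange, List.foldl_cons, List.foldl_nil, List.nil_append,
    Int.toNat_natCast]
  have h0 : PySem.List.pyGetD fftBase 0 0 = 0 := by decide
  have h1 : PySem.List.pyGetD fftBase 1 0 = 1 := by decide
  have h2 : PySem.List.pyGetD fftBase 2 0 = 0 := by decide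
  have h3 : PySem.List.pyGetD fftBase 3 0 = -1 := by decide
  rw [h0, h1, h2, h3]
  rw [PySem.List.slice_from_one]
  simp only [List.replicate_succ, List.cons_append, List.tail_cons,
    PySem.List.pyGetD_zero_cons, patP]
  simp [List.append_assoc]

theorem patP_length (m : Nat) (hm : 1 ≤ m) : (patP m).length = 4 * m := by
  simp [patP]; omega

theorem patP_getD (m r : Nat) (hm : 1 ≤ m) (hrlt : r < 4 * m) :
    (patP m).getD r 0 = fcoef m r := by
  unfold patP fcoef
  rw [(rfl : ([0] : List Int) = List.replicate 1 0)]
  rcases Nat.lt_or_ge r (m - 1) with h | h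
  · rw [Nat.div_eq_of_lt (by omega)]
    simp only [Nat.zero_mod]
    norm_num
    simp only [List.getD_eq_getElem?_getD, List.getElem?_append, List.length_replicate, List.length_append,
      List.getElem?_replicate]
    split_ifs <;> (try simp only [Option.getD_some, Option.getD_none]) <;> omega
  · rcases Nat.lt_or_ge r (2 * m - 1) with h2 | h2
    · have hq : (r + 1) / m = 1 := Nat.div_eq_of_lt_le (by omega) (by omega)
      rw [hq]; clear hq
      simp only [List.getD_eq_getElem?_getD, List.getElem?_append, List.length_replicate, List.length_append,
        List.getElem?_replicate]
      split_ifs <;> (try simp only [Option.getD_some, Option.getD_none]) <;> omega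
    · rcases Nat.lt_or_ge r (3 * m - 1) with h3 | h3
      · have hq : (r + 1) / m = 2 := Nat.div_eq_of_lt_le (by omega) (by omega)
        rw [hq]; clear hq
        simp only [List.getD_eq_getElem?_getD, List.getElem?_append, List.length_replicate, List.length_append,
          List.getElem?_replicate]
        split_ifs <;> (try simp only [Option.getD_some, Option.getD_none]) <;> omega
      · rcases Nat.lt_or_ge r (4 * m - 1) with h4 | h4
        · have hq : (r + 1) / m = 3 := Nat.div_eq_of_lt_le (by omega) (by omega)
          rw [hq]; clear hq
          simp only [List.getD_eq_getElem?_getD, List.getElem?_append, List.length_replicate, List.length_append,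
            List.getElem?_replicate]
          split_ifs <;> (try simp only [Option.getD_some, Option.getD_none]) <;> omega
        · have hq : (r + 1) / m = 4 := Nat.div_eq_of_lt_le (by omega) (by omega)
          rw [hq]; clear hq
          simp only [List.getD_eq_getElem?_getD, List.getElem?_append, List.length_replicate, List.length_append,
            List.getElem?_replicate]
          split_ifs <;> (try simp only [Option.getD_some, Option.getD_none]) <;> try omega
          all_goals
            have hidx : r - (m - 1 + m + m + m) = 0 := by omega
          all_goals simp_all [hidx]

theorem patP_getD_mod (m k : Nat) (hm : 1 ≤ m) :
    (patP m).getD (k % (4 * m)) 0 = fcoef m k := by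
  have h4m : 0 < 4 * m := by omega
  set r := k % (4 * m) with hr
  have hrlt : r < 4 * m := Nat.mod_lt _ h4m
  set Q := k / (4 * m) with hQdef
  have hQ : k = 4 * m * Q + r := (Nat.div_add_mod k (4*m)).symm
  have hdiv : (k + 1) / m = (r + 1) / m + 4 * Q := by
    have e : 4 * Q * m = 4 * m * Q := by ring
    have h' : k + 1 = (r + 1) + 4 * Q * m := by omega
    rw [h', Nat.add_mul_div_right _ _ (by omega : 0 < m)]
  have hmod : (k + 1) / m % 4 = (r + 1) / m % 4 := by rw [hdiv]; omega
  rw [patP_getD m r hm hrlt]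
  unfold fcoef
  rw [hmod]

theorem resA_eq (sig : List Int) (m : Nat) (hm : 1 ≤ m) :
    (if sig.length ≤ (generate_pattern (m : Int)).length then
        (sig.zip (generate_pattern (m : Int))).foldl (fun r p => r + p.1 * p.2) 0
      else
        (PySem.List.enumerate sig).foldl
          (fun r p =>
            r + p.2 * PySem.List.pyGetD (generate_pattern (m : Int))
              (PySem.Int.mod p.1 ((generate_pattern (m : Int)).length : Int)) 0) 0)
      = dotc sig m := by
  rw [genpat_eq m hm]
  rw [patP_length m hm]
  split_ifs with hlen
  · -- zip branch
    rw [PySem.List.foldl_add (sig.zip (patP m)) (fun p => p.1 * p.2) 0]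
    rw [zip_sum sig (patP m) (by rw [patP_length m hm]; exact hlen)]
    unfold dotc
    rw [zero_add]
    apply Finset.sum_congr rfl
    intro k hk
    have hkn : k < sig.length := Finset.mem_range.mp hk
    have : k % (4 * m) = k := Nat.mod_eq_of_lt (by omega)
    rw [← patP_getD_mod m k hm, this]
  · -- cycle branch
    rw [PySem.List.enumerate_eq_zipIdx_map]
    rw [List.foldl_map]
    rw [PySem.List.foldl_add sig.zipIdx
      (fun p => p.1 * PySem.List.pyGetD (patP m) (PySem.Int.mod (0 + (p.2 : Int)) ((4*m : Nat) : Int)) 0) 0]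
    rw [zipIdx_sum sig
      (fun k => PySem.List.pyGetD (patP m) (PySem.Int.mod (0 + (k : Int)) ((4*m : Nat) : Int)) 0) 0]
    unfold dotc
    rw [zero_add]
    apply Finset.sum_congr rfl
    intro k hk
    congr 1
    rw [zero_add, zero_add, PySem.Int.mod_natCast k (4*m), PySem.List.pyGetD_natCast]
    exact patP_getD_mod m k hm

theorem fcoef_block1 (m t k : Nat) (hm : 1 ≤ m)
    (hk1 : (m - 1) + 2 * m * t ≤ k) (hk2 : k < (m - 1) + 2 * m * t + m) :
    fcoef m k = if t % 2 = 0 then 1 else -1 := by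
  have hq : (k + 1) / m = 2 * t + 1 := by
    have e : (2 * t + 1) * m = 2 * m * t + m := by ring
    have e2 : (2 * t + 1 + 1) * m = 2 * m * t + 2 * m := by ring
    exact Nat.div_eq_of_lt_le (by omega) (by omega)
  unfold fcoef
  rw [hq]
  rcases Nat.mod_two_eq_zero_or_one t with h | h
  · have h4 : (2 * t + 1) % 4 = 1 := by omega
    simp [h4, h]
  · have h4 : (2 * t + 1) % 4 = 3 := by omega
    simp [h4, h]

theorem fcoef_block2 (m t k : Nat) (hm : 1 ≤ m)
    (hk1 : (m - 1) + 2 * m * t + m ≤ k) (hk2 : k < (m - 1) + 2 * m * t + 2 * m) :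
    fcoef m k = 0 := by
  have hq : (k + 1) / m = 2 * t + 2 := by
    have e : (2 * t + 2) * m = 2 * m * t + 2 * m := by ring
    have e2 : (2 * t + 2 + 1) * m = 2 * m * t + 3 * m := by ring
    exact Nat.div_eq_of_lt_le (by omega) (by omega)
  unfold fcoef
  rw [hq, if_neg (by omega), if_neg (by omega)]

theorem sum_block (sig : List Int) (m j t : Nat) (hm : 1 ≤ m)
    (hj : j = (m - 1) + 2 * m * t) (hjn : j < sig.length) :
    ∑ k ∈ Finset.Ico j sig.length, sig.getD k 0 * fcoef m k
      = (if t % 2 = 0 then (1:Int) else -1)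
          * ∑ k ∈ Finset.Ico j (min (j + m) sig.length), sig.getD k 0
        + ∑ k ∈ Finset.Ico (j + 2 * m) sig.length, sig.getD k 0 * fcoef m k := by
  set n := sig.length with hn
  set e1 := min (j + m) n with he1
  set e2 := min (j + 2 * m) n with he2
  have h1 : j ≤ e1 := by omega
  have h2 : e1 ≤ e2 := by omega
  have h3 : e2 ≤ n := by omega
  rw [← Finset.sum_Ico_consecutive (fun k => sig.getD k 0 * fcoef m k) (h1.trans h2) h3]
  rw [← Finset.sum_Ico_consecutive (fun k => sig.getD k 0 * fcoef m k) h1 h2]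
  have hb1 : ∑ k ∈ Finset.Ico j e1, sig.getD k 0 * fcoef m k
      = (if t % 2 = 0 then (1:Int) else -1) * ∑ k ∈ Finset.Ico j e1, sig.getD k 0 := by
    rw [Finset.mul_sum]
    apply Finset.sum_congr rfl
    intro k hk
    rw [Finset.mem_Ico] at hk
    rw [fcoef_block1 m t k hm (by omega) (by omega)]
    ring
  have hb2 : ∑ k ∈ Finset.Ico e1 e2, sig.getD k 0 * fcoef m k = 0 := by
    apply Finset.sum_eq_zero
    intro k hk
    rw [Finset.mem_Ico] at hk
    rw [fcoef_block2 m t k hm (by omega) (by omega)]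
    ring
  have hb3 : ∑ k ∈ Finset.Ico e2 n, sig.getD k 0 * fcoef m k
      = ∑ k ∈ Finset.Ico (j + 2 * m) n, sig.getD k 0 * fcoef m k := by
    by_cases h : j + 2 * m ≤ n
    · rw [show e2 = j + 2 * m by omega]
    · rw [Finset.Ico_eq_empty (by omega), Finset.Ico_eq_empty (by omega)]
  rw [hb1, hb2, hb3]
  ring

theorem Bloop (sig : List Int) (m : Nat) (hm : 1 ≤ m) :
    ∀ (N j t : Nat), sig.length - j ≤ N → j = (m - 1) + 2 * m * t →
    ∀ tot : Int,
    ((PySem.List.pyRange (j : Int) (sig.length : Int) (((2 * m : Nat) : Int))).foldl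
        (fun (ts : Int × Int) jj =>
          (ts.1 + ts.2 * (PySem.List.pyGetD ([0] ++ sumsFrom 0 sig) (min (jj + (m : Int)) (sig.length : Int)) 0
                          - PySem.List.pyGetD ([0] ++ sumsFrom 0 sig) jj 0), -ts.2))
        (tot, if t % 2 = 0 then 1 else -1)).1
      = tot + ∑ k ∈ Finset.Ico j sig.length, sig.getD k 0 * fcoef m k := by
  intro N
  induction N with
  | zero =>
    intro j t hN hj tot
    have hjn : sig.length ≤ j := by omega
    have hnil : PySem.List.pyRange (j : Int) (sig.length : Int) (((2 * m : Nat) : Int)) = [] := by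
      rw [PySem.List.pyRange_of_pos _ _ (by exact_mod_cast (by omega : (0:Int) < ((2*m : Nat) : Int)))]
      rw [if_neg (by exact_mod_cast (by omega : ¬ ((j:Int) < (sig.length : Int))))]
      simp
    rw [hnil, List.foldl_nil, Finset.Ico_eq_empty (by omega)]
    simp
  | succ N ih =>
    intro j t hN hj tot
    by_cases hjn : sig.length ≤ j
    · have hnil : PySem.List.pyRange (j : Int) (sig.length : Int) (((2 * m : Nat) : Int)) = [] := by
        rw [PySem.List.pyRange_of_pos _ _ (by exact_mod_cast (by omega : (0:Int) < ((2*m : Nat) : Int)))]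
        rw [if_neg (by exact_mod_cast (by omega : ¬ ((j:Int) < (sig.length : Int))))]
        simp
      rw [hnil, List.foldl_nil, Finset.Ico_eq_empty (by omega)]
      simp
    · have hjn' : j < sig.length := by omega
      rw [pyRange_pos_cons _ _ _ (by exact_mod_cast (by omega : (0:Int) < ((2*m : Nat) : Int)))
        (by exact_mod_cast hjn')]
      rw [List.foldl_cons]
      have hcast : (j : Int) + ((2 * m : Nat) : Int) = ((j + 2 * m : Nat) : Int) := by push_cast; ring
      have hsign : -(if t % 2 = 0 then (1:Int) else -1) = if (t + 1) % 2 = 0 then 1 else -1 := by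
        rcases Nat.mod_two_eq_zero_or_one t with h | h <;> simp [h, Nat.add_mod]
      rw [hcast]
      have step1 : ((j:Int) + (m:Int)) = ((j + m : Nat) : Int) := by push_cast; ring
      have hmin : min ((j:Int) + (m:Int)) ((sig.length:Int)) = ((min (j + m) sig.length : Nat) : Int) := by
        rw [step1]; exact (Nat.cast_min (j+m) sig.length).symm
      rw [hmin]
      rw [PySem.List.pyGetD_natCast, PySem.List.pyGetD_natCast]
      rw [prefix_getD sig (min (j + m) sig.length) (by omega),
        prefix_getD sig j (by omega)]
      rw [show ∑ k ∈ Finset.range (min (j + m) sig.length), sig.getD k 0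
            - ∑ k ∈ Finset.range j, sig.getD k 0
          = ∑ k ∈ Finset.Ico j (min (j + m) sig.length), sig.getD k 0 from
        (Finset.sum_Ico_eq_sub _ (by omega)).symm]
      rw [hsign]
      rw [ih (j + 2 * m) (t + 1) (by omega) (by rw [hj]; ring) _]
      rw [sum_block sig m j t hm hj hjn']
      ring

theorem resB_eq (sig : List Int) (m : Nat) (hm : 1 ≤ m) :
    ((PySem.List.pyRange ((m : Int) - 1) (sig.length : Int) (2 * (m : Int))).foldl
        (fun (ts : Int × Int) j =>
          (ts.1 + ts.2 * (PySem.List.pyGetD ([0] ++ sumsFrom 0 sig) (min (j + (m : Int)) (sig.length : Int)) 0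
                          - PySem.List.pyGetD ([0] ++ sumsFrom 0 sig) j 0), -ts.2))
        (0, 1)).1
      = dotc sig m := by
  have hc1 : ((m : Int) - 1) = (((m - 1 : Nat)) : Int) := by push_cast [Nat.cast_sub hm]; ring
  have hc2 : (2 * (m : Int)) = (((2 * m : Nat)) : Int) := by push_cast; ring
  have h1 : (1 : Int) = if (0 : Nat) % 2 = 0 then 1 else -1 := by norm_num
  rw [hc1, hc2, h1]
  rw [Bloop sig m hm (sig.length) (m - 1) 0 (by omega) (by omega) 0]
  rw [zero_add]
  unfold dotc
  rw [Finset.range_eq_Ico]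
  by_cases h : m - 1 ≤ sig.length
  · rw [← Finset.sum_Ico_consecutive (fun k => sig.getD k 0 * fcoef m k)
      (Nat.zero_le (m - 1)) h]
    have hz : ∑ k ∈ Finset.Ico 0 (m - 1), sig.getD k 0 * fcoef m k = 0 := by
      apply Finset.sum_eq_zero
      intro k hk
      rw [Finset.mem_Ico] at hk
      rw [fcoef_small m k (by omega)]
      ring
    rw [hz, zero_add]
  · rw [Finset.Ico_eq_empty (by omega : ¬ (m - 1 : Nat) < sig.length)]
    rw [Finset.sum_empty]
    apply (Finset.sum_eq_zero _).symm
    intro k hk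
    rw [Finset.mem_Ico] at hk
    rw [fcoef_small m k (by omega)]
    ring

-- ===== VERDICT (by name: the statement is the Claim_ definition above) =====
set_option maxHeartbeats 1000000 in
theorem fft_spec : Claim_equal_fft := by
  intro signal _
  show fft signal = fft_alt signal
  unfold fft fft_alt
  have hpfx : signal.foldl (fun pre x => pre ++ [PySem.List.pyGetD pre (-1) 0 + x]) [0]
      = [0] ++ sumsFrom 0 signal := by
    simpa using prefix_foldl signal [] 0
  simp only [hpfx]
  apply PySem.List.foldl_congr_mem
  intro acc i hi
  rw [PySem.List.mem_pyRange_one] at hi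
  obtain ⟨h1, h2⟩ := hi
  obtain ⟨m, rfl⟩ : ∃ m : Nat, i = (m : Int) := ⟨i.toNat, (Int.toNat_of_nonneg (by omega)).symm⟩
  have hm : 1 ≤ m := by exact_mod_cast h1
  rw [resA_eq signal m hm, resB_eq signal m hm]
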